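-- pv_equiv track=rewrite | github.com/The-Sage-Mage-LLC/image-processing-app | tools/maintenance/complexity_analysis.py | _generate_complexity_recommendations
-- ===== SOURCE A (Python) =====
-- from typing import Dict, List, Any, Optional, Tuple, NamedTuple
--
-- def _generate_complexity_recommendations(issues: List[str]) -> List[str]:
--     """Generate recommendations based on complexity issues."""
--     recommendations = []
--
--     for issue in issues:
--         if "cyclomatic complexity" in issue.lower():
--             recommendations.append("Break down complex functions into smaller, focused functions")
--             recommendations.append("Extract complex logic into separate helper methods")
--         elif "cognitive complexity" in issue.lower():
--             recommendations.append("Reduce nested loops and conditional statements")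
--             recommendations.append("Use early returns to reduce nesting levels")
--         elif "bug count" in issue.lower():
--             recommendations.append("Review code for potential logic errors")
--             recommendations.append("Increase test coverage for complex functions")
--         elif "file size" in issue.lower():
--             recommendations.append("Split large files into smaller, focused modules")
--             recommendations.append("Extract classes and functions into separate files")
--         elif "comment ratio" in issue.lower():
--             recommendations.append("Add docstrings and inline comments")
--             recommendations.append("Document complex algorithms and business logic")
--
--     # Remove duplicates while preserving order
--     seen = set()
--     unique_recommendations = []
--     for rec in recommendations:
--         if rec not in seen:
--             seen.add(rec)
--             unique_recommendations.append(rec)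
--
--     return unique_recommendations
-- ===== SOURCE B (Python) =====
-- from typing import List
--
-- _KEYWORDS = ("cyclomatic complexity", "cognitive complexity", "bug count",
--              "file size", "comment ratio")
-- _RECS = (
--     ["Break down complex functions into smaller, focused functions",
--      "Extract complex logic into separate helper methods"],
--     ["Reduce nested loops and conditional statements",
--      "Use early returns to reduce nesting levels"],
--     ["Review code for potential logic errors",
--      "Increase test coverage for complex functions"],
--     ["Split large files into smaller, focused modules",
--      "Extract classes and functions into separate files"],
--     ["Add docstrings and inline comments",
--      "Document complex algorithms and business logic"],
-- )
--
-- def _generate_complexity_recommendations(issues: List[str]) -> List[str]: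
--     """Generate recommendations based on complexity issues."""
--     # Classify each issue to a category index, dedup at the CATEGORY level in
--     # order of first appearance, and expand to recommendation strings only once
--     # at the end.  This is equivalent to A because each category's two
--     # recommendation strings are unique to that category, so string-level dedup
--     # coincides with category-level dedup.
--     order = []
--     for issue in issues:
--         low = issue.lower()
--         k = next((i for i, kw in enumerate(_KEYWORDS) if kw in low), None)
--         if k is not None and k not in order:
--             order.append(k)
--     return [rec for k in order for rec in _RECS[k]]
-- ===== Notes on version B (the rewrite author's own statement) =====
-- stated objective: simpler
-- what changed: B never accumulates duplicate strings: it classifies each issue to a category index, keeps the distinct category indices in order of first appearance, and expands each surviving category to its two recommendation strings once at the end, instead of A's per-issue string appends followed by a string-level seen-set dedup pass; correct because each category's recommendation strings are unique to it.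
import Mathlib
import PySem

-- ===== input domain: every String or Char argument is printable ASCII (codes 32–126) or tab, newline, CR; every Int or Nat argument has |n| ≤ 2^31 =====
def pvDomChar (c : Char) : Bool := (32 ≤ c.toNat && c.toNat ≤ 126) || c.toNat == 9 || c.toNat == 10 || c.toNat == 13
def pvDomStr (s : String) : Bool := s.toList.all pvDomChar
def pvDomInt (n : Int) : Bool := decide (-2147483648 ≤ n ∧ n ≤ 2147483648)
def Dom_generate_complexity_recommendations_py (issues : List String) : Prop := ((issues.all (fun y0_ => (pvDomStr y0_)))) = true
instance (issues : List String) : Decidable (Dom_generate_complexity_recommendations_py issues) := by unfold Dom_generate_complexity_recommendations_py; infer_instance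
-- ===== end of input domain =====

-- B dedups at the category level (distinct category indices in order of first appearance,
-- expanded to recommendation strings once at the end) instead of A's per-issue string
-- appends followed by a string-level seen-set dedup pass (simpler, same cost).


-- ===== PORT A =====
-- elif-chain step over the string accumulator, then the seen-set dedup loop, as in A.
def generate_complexity_recommendations_py (issues : List String) : List String :=
  let recommendations := issues.foldl (fun acc issue =>
    if PySem.Str.isIn "cyclomatic complexity" (PySem.Str.lower issue) then
      acc ++ ["Break down complex functions into smaller, focused functions",
              "Extract complex logic into separate helper methods"]
    else if PySem.Str.isIn "cognitive complexity" (PySem.Str.lower issue) then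
      acc ++ ["Reduce nested loops and conditional statements",
              "Use early returns to reduce nesting levels"]
    else if PySem.Str.isIn "bug count" (PySem.Str.lower issue) then
      acc ++ ["Review code for potential logic errors",
              "Increase test coverage for complex functions"]
    else if PySem.Str.isIn "file size" (PySem.Str.lower issue) then
      acc ++ ["Split large files into smaller, focused modules",
              "Extract classes and functions into separate files"]
    else if PySem.Str.isIn "comment ratio" (PySem.Str.lower issue) then
      acc ++ ["Add docstrings and inline comments",
              "Document complex algorithms and business logic"]
    else acc) []
  (recommendations.foldl (fun (st : PySem.Set String × List String) rec =>
      if st.1.contains rec then st else (st.1.add rec, st.2 ++ [rec]))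
    (PySem.Set.empty, [])).2

-- ===== PORT B =====
-- first keyword index matching the lowered issue ('next((i for i, kw …), None)')
def pvCat (low : String) : Option Nat :=
  if PySem.Str.isIn "cyclomatic complexity" low then some 0
  else if PySem.Str.isIn "cognitive complexity" low then some 1
  else if PySem.Str.isIn "bug count" low then some 2
  else if PySem.Str.isIn "file size" low then some 3
  else if PySem.Str.isIn "comment ratio" low then some 4
  else none

-- _RECS[k]
def pvRecs : Nat → List String
  | 0 => ["Break down complex functions into smaller, focused functions",
          "Extract complex logic into separate helper methods"]
  | 1 => ["Reduce nested loops and conditional statements",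
          "Use early returns to reduce nesting levels"]
  | 2 => ["Review code for potential logic errors",
          "Increase test coverage for complex functions"]
  | 3 => ["Split large files into smaller, focused modules",
          "Extract classes and functions into separate files"]
  | 4 => ["Add docstrings and inline comments",
          "Document complex algorithms and business logic"]
  | _ => []

def generate_complexity_recommendations_py_alt (issues : List String) : List String :=
  let order := issues.foldl (fun (ord : List Nat) issue =>
    match pvCat (PySem.Str.lower issue) with
    | some k => if ord.contains k then ord else ord ++ [k]
    | none => ord) []
  order.flatMap pvRecs

-- ===== PRECONDITION & SPEC =====
def Spec_generate_complexity_recommendations_py (issues : List String) (out : List String) : Prop := out = generate_complexity_recommendations_py_alt issues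
instance (issues : List String) (out : List String) : Decidable (Spec_generate_complexity_recommendations_py issues out) := by unfold Spec_generate_complexity_recommendations_py; infer_instance

-- ===== CLAIM =====
def Claim_equal_generate_complexity_recommendations_py : Prop := ∀ (issues : List String), Dom_generate_complexity_recommendations_py issues → Spec_generate_complexity_recommendations_py issues (generate_complexity_recommendations_py issues)

-- ===== LEMMAS AND PROOFS =====

-- per-issue contribution of A's elif chain, as a function of the category
def pvG (issue : String) : List String :=
  match pvCat (PySem.Str.lower issue) with
  | some k => pvRecs k
  | none => []

-- A's elif step equals appending the recommendations of the issue's category.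
theorem pv_step_eq (acc : List String) (issue : String) :
    (if PySem.Str.isIn "cyclomatic complexity" (PySem.Str.lower issue) then
      acc ++ ["Break down complex functions into smaller, focused functions",
              "Extract complex logic into separate helper methods"]
    else if PySem.Str.isIn "cognitive complexity" (PySem.Str.lower issue) then
      acc ++ ["Reduce nested loops and conditional statements",
              "Use early returns to reduce nesting levels"]
    else if PySem.Str.isIn "bug count" (PySem.Str.lower issue) then
      acc ++ ["Review code for potential logic errors",
              "Increase test coverage for complex functions"]
    else if PySem.Str.isIn "file size" (PySem.Str.lower issue) then
      acc ++ ["Split large files into smaller, focused modules",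
              "Extract classes and functions into separate files"]
    else if PySem.Str.isIn "comment ratio" (PySem.Str.lower issue) then
      acc ++ ["Add docstrings and inline comments",
              "Document complex algorithms and business logic"]
    else acc) = acc ++ pvG issue := by
  simp only [pvG, pvCat]
  split_ifs <;> simp [pvRecs]

theorem pv_cat_lt (s : String) (k : Nat) (h : pvCat s = some k) : k < 5 := by
  simp only [pvCat] at h
  split_ifs at h <;> simp_all <;> omega

-- distinct categories have disjoint recommendation lists, each with two distinct strings
theorem pv_recs_disj : ∀ k < 5, ∀ j < 5, ∀ r ∈ pvRecs k, r ∈ pvRecs j → k = j := by decide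

theorem pv_recs_nodup : ∀ k < 5, (pvRecs k).Nodup := by decide

-- A's seen-set dedup loop returns PySem.List.dedup (proved via the paired state).
theorem pv_dedup_loop (l : List String) (s : PySem.Set String) :
    l.foldl (fun (st : PySem.Set String × List String) rec =>
        if st.1.contains rec then st else (st.1.add rec, st.2 ++ [rec])) (s, (s : List String))
      = (l.foldl PySem.Set.add s, l.foldl PySem.Set.add s) := by
  induction l generalizing s with
  | nil => rfl
  | cons x t ih =>
      simp only [List.foldl_cons]
      by_cases h : s.contains x = true
      · have ha : PySem.Set.add s x = s := by
          simp only [PySem.Set.add, h, if_pos]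
        rw [if_pos h, ha]
        exact ih s
      · have ha : PySem.Set.add s x = s ++ [x] := by
          simp only [PySem.Set.add, h, if_neg, Bool.false_eq_true, not_false_iff]
        rw [if_neg h, ha]
        exact ih (s ++ [x])

theorem pv_dedup_eq (l : List String) :
    (l.foldl (fun (st : PySem.Set String × List String) rec =>
        if st.1.contains rec then st else (st.1.add rec, st.2 ++ [rec]))
      (PySem.Set.empty, [])).2 = l.foldl PySem.Set.add [] := by
  have h := pv_dedup_loop l PySem.Set.empty
  simp only [show (PySem.Set.empty : PySem.Set String) = [] from rfl] at h ⊢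
  rw [h]

-- A's accumulation equals the flatMap of per-issue contributions,
-- which factors through the list of category indices.
theorem pv_flatMap_factor (issues : List String) :
    issues.flatMap pvG
      = (issues.filterMap (fun i => pvCat (PySem.Str.lower i))).flatMap pvRecs := by
  induction issues with
  | nil => rfl
  | cons i t ih =>
      simp only [List.flatMap_cons, List.filterMap_cons, pvG]
      cases h : pvCat (PySem.Str.lower i) <;> simp [ih]

-- B's order loop factors through the same category list.
theorem pv_order_factor (issues : List String) (ord : List Nat) :
    issues.foldl (fun (ord : List Nat) issue =>
      match pvCat (PySem.Str.lower issue) with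
      | some k => if ord.contains k then ord else ord ++ [k]
      | none => ord) ord
    = (issues.filterMap (fun i => pvCat (PySem.Str.lower i))).foldl
        (fun ord k => if ord.contains k then ord else ord ++ [k]) ord := by
  induction issues generalizing ord with
  | nil => rfl
  | cons i t ih =>
      simp only [List.foldl_cons, List.filterMap_cons]
      cases h : pvCat (PySem.Str.lower i) with
      | none => exact ih ord
      | some k => exact ih _

-- Main invariant: string-level Set.add over the expanded categories equals
-- category-level dedup followed by expansion.
theorem pv_foldl_add_mem (l S : List String) (h : ∀ r ∈ l, r ∈ S) :
    l.foldl PySem.Set.add S = S := by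
  induction l with
  | nil => rfl
  | cons a t ih =>
      simp only [List.foldl_cons]
      have ha : PySem.Set.add S a = S := by
        have := h a (List.mem_cons_self)
        simp [PySem.Set.add, this]
      rw [ha]
      exact ih (fun r hr => h r (by simp [hr]))

theorem pv_foldl_add_fresh (l S : List String) (hnin : ∀ r ∈ l, r ∉ S) (hnd : l.Nodup) :
    l.foldl PySem.Set.add S = S ++ l := by
  induction l generalizing S with
  | nil => simp
  | cons a t ih =>
      simp only [List.foldl_cons]
      have ha : PySem.Set.add S a = S ++ [a] := by
        have := hnin a (List.mem_cons_self)
        simp [PySem.Set.add, this]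
      rw [ha, ih (S ++ [a])
        (fun r hr => by
          intro hin
          rcases List.mem_append.mp hin with h | h
          · exact hnin r (by simp [hr]) h
          · simp at h
            exact (List.nodup_cons.mp hnd).1 (h ▸ hr))
        (List.nodup_cons.mp hnd).2]
      simp

theorem pv_main (ks : List Nat) (hks : ∀ k ∈ ks, k < 5)
    (ordC : List Nat) (hord : ∀ j ∈ ordC, j < 5) :
    (ks.flatMap pvRecs).foldl PySem.Set.add (ordC.flatMap pvRecs)
      = (ks.foldl (fun ord k => if ord.contains k then ord else ord ++ [k]) ordC).flatMap pvRecs := by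
  induction ks generalizing ordC with
  | nil => rfl
  | cons k t ih =>
      have hk : k < 5 := hks k (by simp)
      have ht : ∀ j ∈ t, j < 5 := fun j hj => hks j (by simp [hj])
      simp only [List.flatMap_cons, List.foldl_append, List.foldl_cons]
      by_cases hc : k ∈ ordC
      · rw [pv_foldl_add_mem _ _ (fun r hr => List.mem_flatMap.mpr ⟨k, hc, hr⟩),
            if_pos (by simpa [List.contains_iff_mem] using hc)]
        exact ih ht ordC hord
      · have hfresh : ∀ r ∈ pvRecs k, r ∉ ordC.flatMap pvRecs := by
          intro r hr hin
          obtain ⟨j, hj, hrj⟩ := List.mem_flatMap.mp hin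
          exact hc (pv_recs_disj k hk j (hord j hj) r hr hrj ▸ hj)
        rw [pv_foldl_add_fresh _ _ hfresh (pv_recs_nodup k hk),
            if_neg (by simpa [List.contains_iff_mem] using hc)]
        have hsplit : ordC.flatMap pvRecs ++ pvRecs k = (ordC ++ [k]).flatMap pvRecs := by
          simp [List.flatMap_append]
        rw [hsplit]
        exact ih ht (ordC ++ [k]) (by
          intro j hj
          rcases List.mem_append.mp hj with h | h
          · exact hord j h
          · simp at h; omega)

-- ===== VERDICT =====
theorem generate_complexity_recommendations_py_spec : Claim_equal_generate_complexity_recommendations_py := by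
  intro issues _
  unfold Spec_generate_complexity_recommendations_py
  unfold generate_complexity_recommendations_py generate_complexity_recommendations_py_alt
  rw [funext fun acc => funext fun issue => pv_step_eq acc issue]
  rw [pv_dedup_eq, PySem.List.foldl_append_eq_flatMap, List.nil_append, pv_flatMap_factor]
  simp only [pv_order_factor]
  have hks : ∀ k ∈ issues.filterMap (fun i => pvCat (PySem.Str.lower i)), k < 5 := by
    intro k hk
    obtain ⟨i, _, h⟩ := List.mem_filterMap.mp hk
    exact pv_cat_lt _ _ h
  simpa using pv_main _ hks [] (by simp)
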